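-- pv_equiv track=rewrite | github.com/piotoor/AdventOfCode2022 | day12.py | find_src_trgt
-- ===== SOURCE A (Python) =====
-- def find_src_trgt(data):
--     src = (0, 0)
--     trgt = (0, 0)
--
--     for i in range(len(data)):
--         for j in range(len(data[i])):
--             if data[i][j] == "S":
--                 src = (i, j)
--             if data[i][j] == "E":
--                 trgt = (i, j)
--
--     return src, trgt
-- ===== SOURCE B (Python) =====
-- def find_src_trgt(data):
--     # Search back-to-front with early exit: the first hit scanning from the
--     # end is exactly the last occurrence that A's forward keep-last scan keeps.
--     def locate(ch):
--         for i in range(len(data) - 1, -1, -1):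
--             row = data[i]
--             for j in range(len(row) - 1, -1, -1):
--                 if row[j] == ch:
--                     return (i, j)
--         return (0, 0)
--
--     return locate("S"), locate("E")
-- ===== Notes on version B (the rewrite author's own statement) =====
-- stated objective: alternative
-- what changed: Replaces A's forward keep-last scan with an accumulator pair by two staged back-to-front searches with early exit (reversed ranges, return on first hit), which yields the same last-occurrence positions without maintaining any state.
import Mathlib
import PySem

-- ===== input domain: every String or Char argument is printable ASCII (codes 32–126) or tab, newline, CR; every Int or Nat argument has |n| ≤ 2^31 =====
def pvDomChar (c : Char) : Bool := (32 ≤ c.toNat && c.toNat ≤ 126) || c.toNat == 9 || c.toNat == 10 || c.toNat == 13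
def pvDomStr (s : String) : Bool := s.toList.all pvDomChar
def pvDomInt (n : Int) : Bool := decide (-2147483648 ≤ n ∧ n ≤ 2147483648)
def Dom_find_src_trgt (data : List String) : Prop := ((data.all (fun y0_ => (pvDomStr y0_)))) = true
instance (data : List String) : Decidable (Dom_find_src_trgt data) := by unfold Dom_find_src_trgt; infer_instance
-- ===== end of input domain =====

-- B replaces A's forward keep-last scan (accumulator pair) by two staged back-to-front
-- searches with early exit (objective: alternative).

-- ===== PORT A =====
-- nested index loops 'for i in range(len(data)): for j in range(len(data[i])): …',
-- strings indexed through their character lists (exact on the ASCII domain)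
def find_src_trgt (data : List String) : (Int × Int) × (Int × Int) :=
  (PySem.List.pyRange 0 (data.length) 1).foldl
    (fun (st : (Int × Int) × (Int × Int)) i =>
      let row := (PySem.List.pyGetD data i "").toList
      (PySem.List.pyRange 0 (row.length) 1).foldl
        (fun st j =>
          let st := if PySem.List.pyGetD row j ' ' = 'S' then ((i, j), st.2) else st
          if PySem.List.pyGetD row j ' ' = 'E' then (st.1, (i, j)) else st)
        st)
    ((0, 0), (0, 0))

-- ===== PORT B =====
-- 'for i in range(len(data)-1, -1, -1): for j in range(len(row)-1, -1, -1): if row[j] == ch: return (i, j)'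
-- the early-return double loop is ported as nested findSome? over the countdown ranges
def pvLocate (data : List String) (ch : Char) : Int × Int :=
  match (PySem.List.pyRange ((data.length : Int) - 1) (-1) (-1)).findSome? (fun i =>
      let row := (PySem.List.pyGetD data i "").toList
      (PySem.List.pyRange ((row.length : Int) - 1) (-1) (-1)).findSome? (fun j =>
        if PySem.List.pyGetD row j ' ' = ch then some (i, j) else none)) with
  | some p => p
  | none => (0, 0)

def find_src_trgt_alt (data : List String) : (Int × Int) × (Int × Int) :=
  (pvLocate data 'S', pvLocate data 'E')

-- ===== PRECONDITION & SPEC =====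
def Spec_find_src_trgt (data : List String) (out : (Int × Int) × (Int × Int)) : Prop := out = find_src_trgt_alt data
instance (data : List String) (out : (Int × Int) × (Int × Int)) : Decidable (Spec_find_src_trgt data out) := by unfold Spec_find_src_trgt; infer_instance

-- ===== CLAIM (what is proved, stated in full; the proofs are below) =====
def Claim_equal_find_src_trgt : Prop := ∀ (data : List String), Dom_find_src_trgt data → Spec_find_src_trgt data (find_src_trgt data)

-- ===== LEMMAS AND PROOFS =====

-- a keep-last fold is the first hit of the reversed list
theorem pv_foldl_keepLast {α β : Type} (f : α → Option β) :
    ∀ (l : List α) (init : β),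
      l.foldl (fun st x => (f x).getD st) init = (l.reverse.findSome? f).getD init := by
  intro l
  induction l with
  | nil => intro init; simp
  | cons x xs ih =>
      intro init
      simp only [List.foldl_cons, List.reverse_cons, List.findSome?_append, ih]
      cases h : xs.reverse.findSome? f <;> simp [Option.getD]

-- a pair fold whose step acts componentwise splits into two folds
theorem pv_foldl_pair {α β γ : Type} (g1 : β → α → β) (g2 : γ → α → γ) :
    ∀ (l : List α) (a : β) (b : γ),
      l.foldl (fun st x => (g1 st.1 x, g2 st.2 x)) (a, b) = (l.foldl g1 a, l.foldl g2 b) := by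
  intro l
  induction l with
  | nil => intro a b; simp
  | cons x xs ih => intro a b; simp [ih]

theorem pv_findSome?_flatMap {α β γ : Type} (g : α → List β) (f : β → Option γ) :
    ∀ (l : List α), (l.flatMap g).findSome? f = l.findSome? (fun x => (g x).findSome? f) := by
  intro l
  induction l with
  | nil => simp
  | cons x xs ih =>
      simp only [List.flatMap_cons, List.findSome?_append, ih, List.findSome?_cons]
      cases h : (g x).findSome? f <;> simp [Option.or]

theorem pv_findSome?_map {α β γ : Type} (g : α → β) (f : β → Option γ) :
    ∀ (l : List α), (l.map g).findSome? f = l.findSome? (fun x => f (g x)) := by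
  intro l
  induction l with
  | nil => simp
  | cons x xs ih => simp [List.findSome?_cons, ih]

theorem pv_foldl_flatMap {α β γ : Type} (g : α → List β) (f : γ → β → γ) :
    ∀ (l : List α) (init : γ),
      l.foldl (fun st x => (g x).foldl f st) init = (l.flatMap g).foldl f init := by
  intro l
  induction l with
  | nil => intro init; simp
  | cons x xs ih => intro init; simp [List.flatMap_cons, List.foldl_append, ih]

-- proof-only helpers: the flattened cell list (i, j, character) and A's step in componentwise form
def pvStep (st : (Int × Int) × (Int × Int)) (x : Int × Int × Char) : (Int × Int) × (Int × Int) :=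
  ((if x.2.2 = 'S' then (x.1, x.2.1) else st.1), (if x.2.2 = 'E' then (x.1, x.2.1) else st.2))

def pvCellRow (i : Int) (row : List Char) : List (Int × Int × Char) :=
  (PySem.List.pyRange 0 (row.length) 1).map (fun j => (i, j, PySem.List.pyGetD row j ' '))

def pvCells (data : List String) : List (Int × Int × Char) :=
  (PySem.List.pyRange 0 (data.length) 1).flatMap
    (fun i => pvCellRow i (PySem.List.pyGetD data i "").toList)

def pvHit (ch : Char) (x : Int × Int × Char) : Option (Int × Int) :=
  if x.2.2 = ch then some (x.1, x.2.1) else none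

theorem pv_A_eq_cells (data : List String) :
    find_src_trgt data = (pvCells data).foldl pvStep ((0, 0), (0, 0)) := by
  unfold find_src_trgt pvCells
  rw [← pv_foldl_flatMap]
  apply PySem.List.foldl_congr_mem
  intro st i _
  unfold pvCellRow
  rw [List.foldl_map]
  apply PySem.List.foldl_congr_mem
  intro st j _
  unfold pvStep
  dsimp only
  split_ifs <;> rfl

theorem pv_hrev (m : Nat) :
    PySem.List.pyRange ((m : Int) - 1) (-1) (-1) = (PySem.List.pyRange 0 (m : Int) 1).reverse := by
  rw [PySem.List.pyRange_neg_one_eq_reverse]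
  norm_num

theorem pv_B_eq_cells (data : List String) (ch : Char) :
    pvLocate data ch = ((pvCells data).reverse.findSome? (pvHit ch)).getD (0, 0) := by
  unfold pvLocate pvCells
  rw [List.reverse_flatMap, pv_findSome?_flatMap, pv_hrev]
  have hfun : (fun i =>
        let row := (PySem.List.pyGetD data i "").toList
        (PySem.List.pyRange ((row.length : Int) - 1) (-1) (-1)).findSome?
          (fun j => if PySem.List.pyGetD row j ' ' = ch then some (i, j) else none))
      = fun i => List.findSome? (pvHit ch)
          ((List.reverse ∘ fun i => pvCellRow i (PySem.List.pyGetD data i "").toList) i) := by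
    funext i
    dsimp only [Function.comp]
    unfold pvCellRow
    rw [← List.map_reverse, pv_findSome?_map, pv_hrev]
    rfl
  rw [hfun]
  cases h : List.findSome? _ ((PySem.List.pyRange 0 (data.length : Int) 1).reverse) <;> simp

theorem find_src_trgt_eq (data : List String) :
    find_src_trgt data = find_src_trgt_alt data := by
  rw [pv_A_eq_cells]
  unfold find_src_trgt_alt
  rw [pv_B_eq_cells data 'S', pv_B_eq_cells data 'E']
  have hstep : pvStep = fun st x => ((pvHit 'S' x).getD st.1, (pvHit 'E' x).getD st.2) := by
    funext st x
    unfold pvStep pvHit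
    split_ifs <;> rfl
  rw [hstep,
    pv_foldl_pair (fun s x => (pvHit 'S' x).getD s) (fun s x => (pvHit 'E' x).getD s),
    pv_foldl_keepLast (pvHit 'S'), pv_foldl_keepLast (pvHit 'E')]

-- ===== VERDICT (by name: the statement is the Claim_ definition above) =====
theorem find_src_trgt_spec : Claim_equal_find_src_trgt := by
  intro data _
  unfold Spec_find_src_trgt
  exact find_src_trgt_eq data
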